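-- pv_equiv track=rewrite | github.com/Open-Verifik/verifik-documentation | scripts/fix-lse-mdx-markdown.py | collapse_blank_lines_in_pipe_tables_outside_fences
-- ===== SOURCE A (Python) =====
-- def collapse_blank_lines_in_pipe_tables_outside_fences(text: str) -> str:
--     """GFM tables break if there are blank lines between rows; skip fenced code blocks."""
--     lines = text.split("\n")
--     out: list[str] = []
--     in_fence = False
--     i = 0
--     while i < len(lines):
--         line = lines[i]
--         stripped = line.strip()
--         if stripped.startswith("```"):
--             in_fence = not in_fence
--             out.append(line)
--             i += 1
--             continue
--         if not in_fence and stripped.startswith("|"):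
--             out.append(line)
--             i += 1
--             while i < len(lines):
--                 if lines[i].strip() == "":
--                     j = i + 1
--                     while j < len(lines) and lines[j].strip() == "":
--                         j += 1
--                     if j < len(lines) and lines[j].strip().startswith("|"):
--                         i = j
--                         out.append(lines[i])
--                         i += 1
--                         continue
--                     break
--                 if lines[i].strip().startswith("|"):
--                     out.append(lines[i])
--                     i += 1
--                     continue
--                 break
--             continue
--         out.append(line)
--         i += 1
--     return "\n".join(out)
-- ===== SOURCE B (Python) =====
-- def collapse_blank_lines_in_pipe_tables_outside_fences(text: str) -> str:
--     """Single forward pass with a state machine (in_fence, in_table) and a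
--     pending-blank-lines buffer instead of index lookahead with nested loops."""
--     out: list[str] = []
--     pending: list[str] = []
--     in_fence = False
--     in_table = False
--     for line in text.split("\n"):
--         s = line.strip()
--         if s.startswith("```"):
--             out.extend(pending)
--             pending = []
--             in_table = False
--             in_fence = not in_fence
--             out.append(line)
--         elif in_table:
--             if s == "":
--                 pending.append(line)
--             elif s.startswith("|"):
--                 pending = []
--                 out.append(line)
--             else:
--                 out.extend(pending)
--                 pending = []
--                 out.append(line)
--                 in_table = False
--         else:
--             out.append(line)
--             if not in_fence and s.startswith("|"):
--                 in_table = True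
--     out.extend(pending)
--     return "\n".join(out)
-- ===== Notes on version B (the rewrite author's own statement) =====
-- stated objective: simpler
-- what changed: Replaced the index-driven outer loop with a nested row loop and an inner blank-lookahead loop by a single forward pass: a state machine (in_fence, in_table) with a pending-blank-lines buffer that is discarded when the next row is a pipe line and flushed otherwise or at EOF.
import Mathlib
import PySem

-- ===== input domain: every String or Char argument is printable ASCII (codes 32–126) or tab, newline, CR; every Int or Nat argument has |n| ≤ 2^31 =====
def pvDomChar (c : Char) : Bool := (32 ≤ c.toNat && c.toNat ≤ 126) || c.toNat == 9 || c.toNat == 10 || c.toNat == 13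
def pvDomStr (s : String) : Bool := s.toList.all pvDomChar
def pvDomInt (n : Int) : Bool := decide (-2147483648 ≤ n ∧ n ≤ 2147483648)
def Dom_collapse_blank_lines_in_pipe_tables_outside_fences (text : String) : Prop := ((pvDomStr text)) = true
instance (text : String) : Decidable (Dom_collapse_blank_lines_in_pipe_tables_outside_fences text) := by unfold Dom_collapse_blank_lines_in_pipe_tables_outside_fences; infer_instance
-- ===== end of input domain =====

-- B replaces A's index-driven nested loops (blank lookahead with a j-scan) by a single
-- forward pass: a state machine (in_fence, in_table) with a pending-blank-lines buffer.

-- ===== PORT A =====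
-- the inner `while j < len(lines) and lines[j].strip() == "": j += 1` loop: returns lines[j:]
def pvSkipBlanksA (ls : List String) : List String :=
  match ls with
  | [] => []
  | l :: rest => if PySem.Str.strip l == "" then pvSkipBlanksA rest else l :: rest

theorem pvSkipBlanksA_len_le (ls : List String) : (pvSkipBlanksA ls).length ≤ ls.length := by
  induction ls with
  | nil => simp [pvSkipBlanksA]
  | cons l rest ih =>
      simp only [pvSkipBlanksA]
      split
      · exact Nat.le_succ_of_le ih
      · simp

-- the inner `while i < len(lines): …` table loop of A; lines after index i, with the
-- `out` accumulator; returns (out, remaining lines from the final i)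
def pvInnerA (ls : List String) (out : List String) : List String × List String :=
  match ls with
  | [] => (out, [])
  | l :: rest =>
    if PySem.Str.strip l == "" then
      match hsb : pvSkipBlanksA rest with
      | l2 :: rest2 =>
        if PySem.Str.startswith (PySem.Str.strip l2) "|" then
          pvInnerA rest2 (out ++ [l2])
        else (out, l :: rest)
      | [] => (out, l :: rest)
    else if PySem.Str.startswith (PySem.Str.strip l) "|" then
      pvInnerA rest (out ++ [l])
    else (out, l :: rest)
termination_by ls.length
decreasing_by
  · have := pvSkipBlanksA_len_le rest
    rw [hsb] at this
    simp at this ⊢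
    omega
  · simp

theorem pvInnerA_snd_len_le_aux (n : Nat) :
    ∀ (ls : List String) (out : List String), ls.length ≤ n →
      (pvInnerA ls out).2.length ≤ ls.length := by
  induction n with
  | zero =>
      intro ls out h
      have : ls = [] := by cases ls <;> simp_all
      subst this; simp [pvInnerA]
  | succ n ih =>
      intro ls out h
      match ls with
      | [] => simp [pvInnerA]
      | l :: rest =>
        rw [pvInnerA]
        split
        · split
          next l2 rest2 h2 =>
            have hlen := pvSkipBlanksA_len_le rest
            rw [h2] at hlen
            simp only [List.length_cons] at hlen
            split
            · have := ih rest2 (out ++ [l2]) (by simp at h; omega)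
              simp; omega
            · simp
          next => simp
        · split
          · have := ih rest (out ++ [l]) (by simp at h; omega)
            simp; omega
          · simp

theorem pvInnerA_snd_len_le (ls : List String) (out : List String) :
    (pvInnerA ls out).2.length ≤ ls.length :=
  pvInnerA_snd_len_le_aux ls.length ls out le_rfl

-- the outer `while i < len(lines)` loop of A
def pvOuterA (ls : List String) (fence : Bool) (out : List String) : List String :=
  match ls with
  | [] => out
  | l :: rest =>
    if PySem.Str.startswith (PySem.Str.strip l) "```" then
      pvOuterA rest (!fence) (out ++ [l])
    else if !fence && PySem.Str.startswith (PySem.Str.strip l) "|" then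
      let pr := pvInnerA rest (out ++ [l])
      pvOuterA pr.2 fence pr.1
    else pvOuterA rest fence (out ++ [l])
termination_by ls.length
decreasing_by
  · simp
  · have := pvInnerA_snd_len_le rest (out ++ [l])
    simp; omega
  · simp

-- text.split("\n"): split? is some here since the separator is nonempty; getD [] is unreachable
def collapse_blank_lines_in_pipe_tables_outside_fences (text : String) : String :=
  PySem.Str.join "\n" (pvOuterA ((PySem.Str.split? text "\n").getD []) false [])

-- ===== PORT B =====
-- one step of Source B's for-loop; state = (in_fence, in_table, pending, out)
def pvStepB (st : Bool × Bool × List String × List String) (line : String) :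
    Bool × Bool × List String × List String :=
  let (fence, table, pending, out) := st
  let s := PySem.Str.strip line
  if PySem.Str.startswith s "```" then
    (!fence, false, [], out ++ pending ++ [line])
  else if table then
    if s == "" then (fence, table, pending ++ [line], out)
    else if PySem.Str.startswith s "|" then (fence, table, [], out ++ [line])
    else (fence, false, [], out ++ pending ++ [line])
  else
    (fence, !fence && PySem.Str.startswith s "|", pending, out ++ [line])

def collapse_blank_lines_in_pipe_tables_outside_fences_alt (text : String) : String :=
  let st := ((PySem.Str.split? text "\n").getD []).foldl pvStepB (false, false, [], [])
  PySem.Str.join "\n" (st.2.2.2 ++ st.2.2.1)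

-- ===== PRECONDITION & SPEC =====
def Spec_collapse_blank_lines_in_pipe_tables_outside_fences (text : String) (out : String) : Prop := out = collapse_blank_lines_in_pipe_tables_outside_fences_alt text
instance (text : String) (out : String) : Decidable (Spec_collapse_blank_lines_in_pipe_tables_outside_fences text out) := by unfold Spec_collapse_blank_lines_in_pipe_tables_outside_fences; infer_instance

-- ===== CLAIM (what is proved, stated in full; the proofs are below) =====
def Claim_equal_collapse_blank_lines_in_pipe_tables_outside_fences : Prop := ∀ (text : String), Dom_collapse_blank_lines_in_pipe_tables_outside_fences text → Spec_collapse_blank_lines_in_pipe_tables_outside_fences text (collapse_blank_lines_in_pipe_tables_outside_fences text)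

-- ===== LEMMAS AND PROOFS =====

theorem pv_no_fence_of_pipe (s : String)
    (h : PySem.Str.startswith s "|" = true) :
    PySem.Str.startswith s "```" = false := by
  simp only [PySem.Str.startswith_eq, PySem.Chars.startswith_iff] at h
  by_contra hc
  simp only [Bool.not_eq_false, PySem.Str.startswith_eq, PySem.Chars.startswith_iff] at hc
  obtain ⟨t1, e1⟩ := h
  obtain ⟨t2, e2⟩ := hc
  rw [← e2] at e1
  simp at e1

theorem pv_no_pipe_of_fence (s : String)
    (h : PySem.Str.startswith s "```" = true) :
    PySem.Str.startswith s "|" = false := by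
  by_contra hc
  simp only [Bool.not_eq_false] at hc
  rw [pv_no_fence_of_pipe s hc] at h
  exact Bool.false_ne_true h

theorem pvSkipBlanksA_blank_prefix (bs xs : List String)
    (h : ∀ b ∈ bs, PySem.Str.strip b == "") :
    pvSkipBlanksA (bs ++ xs) = pvSkipBlanksA xs := by
  induction bs with
  | nil => simp
  | cons b bs ih =>
      have hb := h b (by simp)
      simp only [List.cons_append, pvSkipBlanksA, hb, if_true]
      exact ih (fun x hx => h x (by simp [hx]))

theorem pvOuterA_blank_prefix (bs xs : List String) (out : List String)
    (h : ∀ b ∈ bs, PySem.Str.strip b == "") :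
    pvOuterA (bs ++ xs) false out = pvOuterA xs false (out ++ bs) := by
  induction bs generalizing out with
  | nil => simp
  | cons b bs ih =>
      have hb : PySem.Str.strip b = "" := by
        have := h b (by simp); simpa using this
      rw [List.cons_append, pvOuterA]
      have h1 : PySem.Str.startswith (PySem.Str.strip b) "```" = false := by
        rw [hb]; decide
      have h2 : PySem.Str.startswith (PySem.Str.strip b) "|" = false := by
        rw [hb]; decide
      rw [if_neg (by rw [h1]; simp), if_neg (by rw [h2]; simp)]
      rw [ih (out ++ [b]) (fun x hx => h x (by simp [hx]))]
      simp

theorem pvOuterA_all_blank (bs : List String) (out : List String)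
    (h : ∀ b ∈ bs, PySem.Str.strip b == "") :
    pvOuterA bs false out = out ++ bs := by
  have := pvOuterA_blank_prefix bs [] out h
  rw [List.append_nil] at this
  rw [this, pvOuterA]

theorem pvInnerA_all_blank (bs : List String) (out : List String)
    (h : ∀ b ∈ bs, PySem.Str.strip b == "") :
    pvInnerA bs out = (out, bs) := by
  cases bs with
  | nil => simp [pvInnerA]
  | cons b bs =>
      have hskip : pvSkipBlanksA bs = [] := by
        have := pvSkipBlanksA_blank_prefix bs [] (fun x hx => h x (by simp [hx]))
        simpa [pvSkipBlanksA] using this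
      rw [pvInnerA]
      rw [if_pos (h b (by simp))]
      split
      next l2 rest2 h2 => rw [hskip] at h2; exact absurd h2 (by simp)
      next => rfl

-- A's inner loop entered behind all-blank buffered lines, at a non-blank line
set_option maxHeartbeats 1000000 in
theorem pvInnerA_blanks_then (bs : List String) (l : String) (rest out : List String)
    (hbs : ∀ b ∈ bs, PySem.Str.strip b == "")
    (hl : ¬ (PySem.Str.strip l == "") = true) :
    pvInnerA (bs ++ l :: rest) out =
      if PySem.Str.startswith (PySem.Str.strip l) "|" = true then
        pvInnerA rest (out ++ [l])
      else (out, bs ++ l :: rest) := by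
  cases bs with
  | nil =>
      simp only [List.nil_append]
      rw [pvInnerA, if_neg hl]
  | cons b bs =>
      have hskip : pvSkipBlanksA (bs ++ l :: rest) = l :: rest := by
        rw [pvSkipBlanksA_blank_prefix bs (l :: rest) (fun x hx => hbs x (by simp [hx]))]
        rw [pvSkipBlanksA, if_neg hl]
      rw [List.cons_append, pvInnerA, if_pos (hbs b (by simp))]
      split
      next l2 rest2 h2 =>
        rw [hskip] at h2
        injection h2 with e1 e2
        subst e1; subst e2
        rfl
      next h2 => rw [hskip] at h2; exact absurd h2 (by simp)

def pvFinishB (st : Bool × Bool × List String × List String) : List String :=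
  st.2.2.2 ++ st.2.2.1

set_option maxHeartbeats 1000000 in
theorem pv_main (n : Nat) : ∀ (ls : List String), ls.length ≤ n →
    (∀ (fence : Bool) (out : List String),
        pvFinishB (ls.foldl pvStepB (fence, false, [], out)) = pvOuterA ls fence out)
    ∧ (∀ (pending out : List String), (∀ b ∈ pending, PySem.Str.strip b == "") →
        pvFinishB (ls.foldl pvStepB (false, true, pending, out)) =
          pvOuterA (pvInnerA (pending ++ ls) out).2 false (pvInnerA (pending ++ ls) out).1) := by
  induction n with
  | zero =>
      intro ls h
      have hnil : ls = [] := by cases ls <;> simp_all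
      subst hnil
      constructor
      · intro fence out; simp [pvFinishB, pvOuterA]
      · intro pending out hp
        simp only [List.foldl_nil, List.append_nil]
        rw [pvInnerA_all_blank pending out hp]
        rw [pvOuterA_all_blank pending out hp]
        simp [pvFinishB]
  | succ n ih =>
      intro ls hlen
      constructor
      · intro fence out
        match ls, hlen with
        | [], _ => simp [pvFinishB, pvOuterA]
        | l :: rest, hlen =>
          have hr : rest.length ≤ n := by simp at hlen; omega
          rw [pvOuterA, List.foldl_cons]
          by_cases hf : PySem.Str.startswith (PySem.Str.strip l) "```" = true
          · rw [if_pos hf]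
            have step : pvStepB (fence, false, [], out) l = (!fence, false, [], out ++ [l]) := by
              dsimp only [pvStepB]; rw [if_pos hf]; simp
            rw [step]; exact (ih rest hr).1 (!fence) (out ++ [l])
          · have hf' : PySem.Str.startswith (PySem.Str.strip l) "```" = false :=
              Bool.eq_false_iff.mpr hf
            rw [if_neg hf]
            by_cases hp : PySem.Str.startswith (PySem.Str.strip l) "|" = true
            · cases fence with
              | true =>
                  rw [if_neg (by simp)]
                  have step : pvStepB (true, false, [], out) l = (true, false, [], out ++ [l]) := by
                    dsimp only [pvStepB]; rw [if_neg hf, if_neg (by simp)]; rfl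
                  rw [step]; exact (ih rest hr).1 true (out ++ [l])
              | false =>
                  rw [if_pos (by rw [hp]; rfl)]
                  have step : pvStepB (false, false, [], out) l = (false, true, [], out ++ [l]) := by
                    dsimp only [pvStepB]; rw [if_neg hf, if_neg (by simp), hp]; rfl
                  rw [step]
                  have := (ih rest hr).2 [] (out ++ [l]) (by simp)
                  simpa using this
            · have hp' : PySem.Str.startswith (PySem.Str.strip l) "|" = false :=
                Bool.eq_false_iff.mpr hp
              rw [if_neg (by rw [hp']; simp)]
              have step : pvStepB (fence, false, [], out) l = (fence, false, [], out ++ [l]) := by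
                dsimp only [pvStepB]; rw [if_neg hf, if_neg (by simp), hp']
                cases fence <;> rfl
              rw [step]; exact (ih rest hr).1 fence (out ++ [l])
      · intro pending out hpend
        match ls, hlen with
        | [], _ =>
          simp only [List.foldl_nil, List.append_nil]
          rw [pvInnerA_all_blank pending out hpend]
          rw [pvOuterA_all_blank pending out hpend]
          simp [pvFinishB]
        | l :: rest, hlen =>
          have hr : rest.length ≤ n := by simp at hlen; omega
          rw [List.foldl_cons]
          by_cases hb : (PySem.Str.strip l == "") = true
          · have hs : PySem.Str.strip l = "" := by simpa using hb
            have hf : PySem.Str.startswith (PySem.Str.strip l) "```" = false := by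
              rw [hs]; decide
            have step : pvStepB (false, true, pending, out) l = (false, true, pending ++ [l], out) := by
              dsimp only [pvStepB]; rw [if_neg (by rw [hf]; simp), if_pos rfl, if_pos hb]
            rw [step]
            have hpend' : ∀ b ∈ pending ++ [l], PySem.Str.strip b == "" := by
              intro x hx
              rcases List.mem_append.mp hx with h1 | h1
              · exact hpend x h1
              · simp only [List.mem_singleton] at h1; subst h1; exact hb
            have := (ih rest hr).2 (pending ++ [l]) out hpend'
            rw [this, List.append_assoc]
            rfl
          · by_cases hf : PySem.Str.startswith (PySem.Str.strip l) "```" = true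
            · have hp : PySem.Str.startswith (PySem.Str.strip l) "|" = false :=
                pv_no_pipe_of_fence _ hf
              have step : pvStepB (false, true, pending, out) l = (true, false, [], out ++ pending ++ [l]) := by
                dsimp only [pvStepB]; rw [if_pos hf]; rfl
              rw [step]
              rw [pvInnerA_blanks_then pending l rest out hpend hb]
              rw [if_neg (by rw [hp]; simp)]
              rw [pvOuterA_blank_prefix pending (l :: rest) out hpend]
              rw [pvOuterA, if_pos hf]
              rw [(ih rest hr).1 true (out ++ pending ++ [l])]
              rw [List.append_assoc]
              rfl
            · have hf' : PySem.Str.startswith (PySem.Str.strip l) "```" = false :=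
                Bool.eq_false_iff.mpr hf
              by_cases hp : PySem.Str.startswith (PySem.Str.strip l) "|" = true
              · have step : pvStepB (false, true, pending, out) l = (false, true, [], out ++ [l]) := by
                  dsimp only [pvStepB]; rw [if_neg hf, if_pos rfl, if_neg hb, if_pos hp]
                rw [step]
                rw [pvInnerA_blanks_then pending l rest out hpend hb, if_pos hp]
                have := (ih rest hr).2 [] (out ++ [l]) (by simp)
                simpa using this
              · have hp' : PySem.Str.startswith (PySem.Str.strip l) "|" = false :=
                  Bool.eq_false_iff.mpr hp
                have step : pvStepB (false, true, pending, out) l = (false, false, [], out ++ pending ++ [l]) := by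
                  dsimp only [pvStepB]; rw [if_neg hf, if_pos rfl, if_neg hb, if_neg hp]
                rw [step]
                rw [pvInnerA_blanks_then pending l rest out hpend hb, if_neg hp]
                rw [pvOuterA_blank_prefix pending (l :: rest) out hpend]
                rw [pvOuterA, if_neg hf, if_neg (by rw [hp']; simp)]
                rw [(ih rest hr).1 false (out ++ pending ++ [l])]

theorem collapse_main (ls : List String) (out : List String) :
    pvFinishB (ls.foldl pvStepB (false, false, [], out)) = pvOuterA ls false out :=
  (pv_main ls.length ls le_rfl).1 false out

-- ===== VERDICT (by name: the statement is the Claim_ definition above) =====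
theorem collapse_blank_lines_in_pipe_tables_outside_fences_spec : Claim_equal_collapse_blank_lines_in_pipe_tables_outside_fences := by
  intro text _
  unfold Spec_collapse_blank_lines_in_pipe_tables_outside_fences
  unfold collapse_blank_lines_in_pipe_tables_outside_fences
  unfold collapse_blank_lines_in_pipe_tables_outside_fences_alt
  rw [← collapse_main ((PySem.Str.split? text "\n").getD []) []]
  rfl
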